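-- pv_equiv track=rewrite | github.com/Kawser-nerd/CLCDSA | Source Codes/AtCoder/arc075/D/1326012.py | solve
-- ===== SOURCE A (Python) =====
-- def solve(k, d, fl):
--     if k <= 1:
--         if d == 0:
--             return 10 ** k
--         return 0
--     x = (-d) % 10
--     c = 9 - x + 1 - fl
--     d -= 10 ** (k - 1) * x - x
--     return c * solve(k - 2, abs(d) // 10, 0)
-- ===== SOURCE B (Python) =====
-- def solve(k, d, fl):
--     prod = 1
--     while k > 1:
--         x = (-d) % 10
--         prod *= 9 - x + 1 - fl
--         d -= 10 ** (k - 1) * x - x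
--         d = abs(d) // 10
--         fl = 0
--         k -= 2
--     return prod * 10 ** k if d == 0 else 0
-- ===== Notes on version B (the rewrite author's own statement) =====
-- stated objective: simpler
-- what changed: Replaces the linear recursion by an iterative while-loop that threads a multiplicative accumulator, performing the base-case test once after the loop.
-- outside the precondition, e.g. on solve(-1, 0, 0): A returns 0.1, B returns 0.1
import Mathlib
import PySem

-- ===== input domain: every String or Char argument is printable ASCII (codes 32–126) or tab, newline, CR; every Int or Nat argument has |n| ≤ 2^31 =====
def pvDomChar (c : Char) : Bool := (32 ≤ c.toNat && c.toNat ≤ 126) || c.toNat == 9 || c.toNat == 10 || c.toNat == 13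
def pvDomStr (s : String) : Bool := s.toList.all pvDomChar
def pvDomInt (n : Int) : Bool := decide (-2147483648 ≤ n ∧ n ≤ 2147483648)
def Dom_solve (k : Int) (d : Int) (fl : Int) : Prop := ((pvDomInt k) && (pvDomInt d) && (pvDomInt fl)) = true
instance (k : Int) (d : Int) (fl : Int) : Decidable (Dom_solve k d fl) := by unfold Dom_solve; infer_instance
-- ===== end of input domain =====

-- B replaces A's linear recursion by a while-loop threading a multiplicative accumulator (objective: simpler, O(1) stack).

-- ===== PORT A =====
-- literal transliteration of A; 10 ** k is only evaluated inside Pre_ with k ≥ 0, ported as 10 ^ k.toNat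
def solve (k : Int) (d : Int) (fl : Int) : Int :=
  if k ≤ 1 then
    (if d = 0 then 10 ^ k.toNat else 0)
  else
    let x := PySem.Int.mod (-d) 10
    let c := 9 - x + 1 - fl
    let d' := d - (10 ^ (k - 1).toNat * x - x)
    c * solve (k - 2) (PySem.Int.floordiv |d'| 10) 0
termination_by k.toNat
decreasing_by omega

-- ===== PORT B =====
-- the while loop of Source B as a tail recursion over the loop state (prod, k, d, fl)
def solveLoop (k : Int) (d : Int) (fl : Int) (prod : Int) : Int :=
  if k > 1 then
    let x := PySem.Int.mod (-d) 10
    let prod' := prod * (9 - x + 1 - fl)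
    let d' := d - (10 ^ (k - 1).toNat * x - x)
    solveLoop (k - 2) (PySem.Int.floordiv |d'| 10) 0 prod'
  else
    if d = 0 then prod * 10 ^ k.toNat else 0
termination_by k.toNat
decreasing_by omega

def solve_alt (k : Int) (d : Int) (fl : Int) : Int := solveLoop k d fl 1

-- ===== PRECONDITION & SPEC =====
-- Pre_ excludes exactly k < 0 with d = 0, where the Python A returns the float 10**k (e.g. 0.1), not an int.
def Pre_solve (k : Int) (d : Int) (fl : Int) : Prop := 0 ≤ k ∨ d ≠ 0
instance (k : Int) (d : Int) (fl : Int) : Decidable (Pre_solve k d fl) := by unfold Pre_solve; infer_instance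
def pvWitness_solve : Int × Int × Int := (4, 12, 0)

def Spec_solve (k : Int) (d : Int) (fl : Int) (out : Int) : Prop := out = solve_alt k d fl
instance (k : Int) (d : Int) (fl : Int) (out : Int) : Decidable (Spec_solve k d fl out) := by unfold Spec_solve; infer_instance

-- ===== CLAIM (what is proved, stated in full; the proofs are below) =====
def Claim_equal_solve : Prop := ∀ (k : Int) (d : Int) (fl : Int), Dom_solve k d fl → Pre_solve k d fl → Spec_solve k d fl (solve k d fl)

-- ===== LEMMAS AND PROOFS =====

-- loop invariant: the accumulator factors out of the loop
theorem solveLoop_eq (k : Int) (d : Int) (fl : Int) (prod : Int) :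
    solveLoop k d fl prod = prod * solve k d fl := by
  rw [solveLoop, solve]
  split
  · next h =>
    have : ¬ k ≤ 1 := by omega
    simp only [this, if_false] at *
    rw [solveLoop_eq]
    ring
  · next h =>
    have : k ≤ 1 := by omega
    simp only [this, if_true]
    split <;> simp
termination_by k.toNat
decreasing_by omega

-- ===== VERDICT (by name: the statement is the Claim_ definition above) =====
theorem solve_spec : Claim_equal_solve := by
  intro k d fl _ _
  unfold Spec_solve solve_alt
  rw [solveLoop_eq, one_mul]
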